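-- pv_equiv track=rewrite | github.com/amzzb/project | project_5/sm2.py | generate_booth_encoding
-- ===== SOURCE A (Python) =====
-- from typing import Tuple, Optional, List, Dict
--
-- def generate_booth_encoding(k: int) -> List[int]:
--     """生成Booth编码"""
--     # 扩展k，在最低位添加0
--     k_extended = (k << 1)
--     digits = []
--
--     while k_extended > 0:
--         if (k_extended & 3) == 1 or (k_extended & 3) == 2:
--             digits.append(k_extended & 1)
--             k_extended >>= 1
--         elif (k_extended & 3) == 3:
--             digits.append(-1)
--             k_extended = (k_extended + 1) >> 1
--         else:  # (k_extended & 3) == 0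
--             digits.append(0)
--             k_extended >>= 1
--
--     return digits
-- ===== SOURCE B (Python) =====
-- def generate_booth_encoding(k):
--     if k <= 0:
--         return []
--     n = k << 1
--     d = (3 * n) ^ n
--     return [(-1 if (n >> (i + 1)) & 1 else 1) if (d >> (i + 1)) & 1 else 0
--             for i in range(d.bit_length() - 1)]
-- ===== Notes on version B (the rewrite author's own statement) =====
-- stated objective: alternative
-- what changed: A builds the signed-digit (NAF) encoding of 2k with a digit-at-a-time carry-propagation while-loop; B computes it in closed form from the bit trick d = 3n ^ n on n = 2k: the set bits of d mark the nonzero digit positions, the corresponding bit of n gives the sign, and d.bit_length() gives the output length.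
import Mathlib
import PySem

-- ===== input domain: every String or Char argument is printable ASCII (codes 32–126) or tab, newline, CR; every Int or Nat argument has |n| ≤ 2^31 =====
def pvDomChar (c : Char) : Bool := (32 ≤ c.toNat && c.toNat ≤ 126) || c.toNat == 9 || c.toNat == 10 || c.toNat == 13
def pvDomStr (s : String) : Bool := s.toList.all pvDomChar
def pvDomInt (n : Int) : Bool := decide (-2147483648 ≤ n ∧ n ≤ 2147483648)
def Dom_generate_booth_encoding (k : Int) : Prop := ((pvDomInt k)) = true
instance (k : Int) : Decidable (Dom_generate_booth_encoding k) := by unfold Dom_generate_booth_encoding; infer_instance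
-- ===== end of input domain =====

-- B replaces A's digit-by-digit carry loop with the closed-form `3n ^ n` bit trick for the
-- same signed-digit (non-adjacent-form) encoding; objective: alternative algorithm.

-- ===== PORT A =====
-- A's while-loop over k_extended; `x & y` is Int.land, `x >> 1` is `>>> (1:Nat)` on Int
-- (arithmetic shift = Python's floor shift).
-- (pvLandMod is cited by boothLoop's termination proof, so it stays above the port.)
theorem pvLandMod (n : Int) (j : Nat) (h : 0 ≤ n) :
    Int.land n ((2:Int) ^ j - 1) = n % 2 ^ j := by
  obtain ⟨m, rfl⟩ := Int.eq_ofNat_of_zero_le h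
  have h1 : Int.land (m : Int) (((2 ^ j - 1 : Nat) : Int)) = ((m &&& (2 ^ j - 1) : Nat) : Int) := by
    simp [Int.land]
  have h2 : (((2 ^ j - 1 : Nat) : Int)) = (2 : Int) ^ j - 1 := by
    push_cast [Nat.one_le_two_pow]; ring
  rw [h2] at h1
  rw [h1, Nat.and_two_pow_sub_one_eq_mod m j]
  push_cast; omega

def boothLoop (n : Int) : List Int :=
  if h : n > 0 then
    if Int.land n 3 = 1 ∨ Int.land n 3 = 2 then
      Int.land n 1 :: boothLoop (n >>> (1:Nat))
    else if Int.land n 3 = 3 then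
      (-1) :: boothLoop ((n + 1) >>> (1:Nat))
    else
      0 :: boothLoop (n >>> (1:Nat))
  else []
termination_by n.toNat
decreasing_by
  all_goals rename_i hb
  all_goals replace hb := hb
  all_goals rw [show ((3:Int)) = 2 ^ 2 - 1 by norm_num, pvLandMod n 2 (le_of_lt h)] at hb
  all_goals rw [Int.shiftRight_eq_div_pow]
  all_goals norm_num
  all_goals omega

def generate_booth_encoding (k : Int) : List Int :=
  boothLoop (k <<< (1:Nat))

-- ===== PORT B =====
-- Source B: n and d are nonnegative (k > 0 guard), so they are ported as Nat;
-- `d.bit_length()` is Nat.size, `(x >> j) & 1` set is Nat.testBit x j (exact on Nat).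
def generate_booth_encoding_alt (k : Int) : List Int :=
  if k ≤ 0 then []
  else
    let n : Nat := 2 * k.toNat
    let d : Nat := (3 * n) ^^^ n
    (List.range (Nat.size d - 1)).map (fun i =>
      if d.testBit (i + 1) then (if n.testBit (i + 1) then -1 else 1) else 0)

-- ===== PRECONDITION & SPEC =====
def Spec_generate_booth_encoding (k : Int) (out : List Int) : Prop := out = generate_booth_encoding_alt k
instance (k : Int) (out : List Int) : Decidable (Spec_generate_booth_encoding k out) := by unfold Spec_generate_booth_encoding; infer_instance

-- ===== CLAIM (what is proved, stated in full; the proofs are below) =====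
def Claim_equal_generate_booth_encoding : Prop := ∀ (k : Int), Dom_generate_booth_encoding k → Spec_generate_booth_encoding k (generate_booth_encoding k)

-- ===== LEMMAS AND PROOFS =====

-- d n = 3n xor n: the mask of nonzero digit positions of the encoding of n
def pvD (n : Nat) : Nat := (3 * n) ^^^ n

def pvDig (n : Nat) (i : Nat) : Int :=
  if (pvD n).testBit (i + 1) then (if n.testBit (i + 1) then -1 else 1) else 0

def pvG (n : Nat) : List Int := (List.range (Nat.size (pvD n) - 1)).map (pvDig n)

theorem pvXor_ee (a b : Nat) : (2 * a) ^^^ (2 * b) = 2 * (a ^^^ b) := by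
  apply Nat.eq_of_testBit_eq
  intro i
  have h1 : (2 * a) / 2 = a := by omega
  have h2 : (2 * b) / 2 = b := by omega
  have h3 : (2 * (a ^^^ b)) / 2 = a ^^^ b := by omega
  have m1 : (2 * a) % 2 = 0 := by omega
  have m2 : (2 * b) % 2 = 0 := by omega
  have m3 : (2 * (a ^^^ b)) % 2 = 0 := by omega
  rcases i with _ | j
  · simp [Nat.testBit_zero, Nat.testBit_xor, m1, m2, m3]
  · rw [Nat.testBit_xor, Nat.testBit_add_one, Nat.testBit_add_one, Nat.testBit_add_one, h1, h2, h3, Nat.testBit_xor]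

theorem pvXor_oo (a b : Nat) : (2 * a + 1) ^^^ (2 * b + 1) = 2 * (a ^^^ b) := by
  apply Nat.eq_of_testBit_eq
  intro i
  have h1 : (2 * a + 1) / 2 = a := by omega
  have h2 : (2 * b + 1) / 2 = b := by omega
  have h3 : (2 * (a ^^^ b)) / 2 = a ^^^ b := by omega
  have m1 : (2 * a + 1) % 2 = 1 := by omega
  have m2 : (2 * b + 1) % 2 = 1 := by omega
  have m3 : (2 * (a ^^^ b)) % 2 = 0 := by omega
  rcases i with _ | j
  · simp [Nat.testBit_zero, Nat.testBit_xor, m1, m2, m3]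
    omega
  · rw [Nat.testBit_xor, Nat.testBit_add_one, Nat.testBit_add_one, Nat.testBit_add_one, h1, h2, h3, Nat.testBit_xor]

theorem pvXor_eo (a b : Nat) : (2 * a) ^^^ (2 * b + 1) = 2 * (a ^^^ b) + 1 := by
  apply Nat.eq_of_testBit_eq
  intro i
  have h1 : (2 * a) / 2 = a := by omega
  have h2 : (2 * b + 1) / 2 = b := by omega
  have h3 : (2 * (a ^^^ b) + 1) / 2 = a ^^^ b := by omega
  have m1 : (2 * a) % 2 = 0 := by omega
  have m2 : (2 * b + 1) % 2 = 1 := by omega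
  have m3 : (2 * (a ^^^ b) + 1) % 2 = 1 := by omega
  rcases i with _ | j
  · simp [Nat.testBit_zero, Nat.testBit_xor, m1, m2, m3]
  · rw [Nat.testBit_xor, Nat.testBit_add_one, Nat.testBit_add_one, Nat.testBit_add_one, h1, h2, h3, Nat.testBit_xor]

theorem pvD_even (t : Nat) : pvD (2 * t) = 2 * pvD t := by
  unfold pvD
  rw [show 3 * (2 * t) = 2 * (3 * t) by ring, pvXor_ee]

theorem pvD_odd (t : Nat) : pvD (2 * t + 1) = 2 * ((3 * t + 1) ^^^ t) := by
  unfold pvD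
  rw [show 3 * (2 * t + 1) = 2 * (3 * t + 1) + 1 by ring, pvXor_oo]

theorem pvD_mod2 (n : Nat) : pvD n % 2 = 0 := by
  rcases Nat.even_or_odd n with ⟨t, ht⟩ | ⟨t, ht⟩
  · subst ht; rw [show t + t = 2 * t by ring, pvD_even]; omega
  · subst ht; rw [pvD_odd]; omega

theorem pvD_pos {n : Nat} (h : 0 < n) : 0 < pvD n := by
  rcases Nat.eq_zero_or_pos (pvD n) with h0 | h0
  · exfalso
    have := Nat.xor_eq_zero.mp h0
    omega
  · exact h0

theorem pvAddOne_xor (a b : Nat) (ha : a % 2 = 0) (hb : b % 2 = 0) :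
    (a + 1) ^^^ b = (a ^^^ b) + 1 := by
  obtain ⟨a', rfl⟩ : ∃ a', a = 2 * a' := ⟨a / 2, by omega⟩
  obtain ⟨b', rfl⟩ : ∃ b', b = 2 * b' := ⟨b / 2, by omega⟩
  rw [Nat.xor_comm (2 * a' + 1), pvXor_eo, pvXor_ee, Nat.xor_comm b' a']

theorem pvD_odd_even (t : Nat) (ht : t % 2 = 0) : pvD (2 * t + 1) = 2 * (pvD t + 1) := by
  rw [pvD_odd, pvAddOne_xor (3 * t) t (by omega) ht]
  rfl

theorem pvP2 (u : Nat) : (3 * u + 2) ^^^ u = pvD (u + 1) := by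
  induction u using Nat.strong_induction_on with
  | _ u ih =>
    rcases Nat.even_or_odd u with ⟨v, hv⟩ | ⟨v, hv⟩
    · subst hv
      rw [show 3 * (v + v) + 2 = 2 * (3 * v + 1) by ring, show v + v = 2 * v by ring, pvXor_ee,
          show 2 * v + 1 = 2 * v + 1 by rfl, pvD_odd]
    · subst hv
      rw [show 3 * (2 * v + 1) + 2 = 2 * (3 * v + 2) + 1 by ring, pvXor_oo,
          show 2 * v + 1 + 1 = 2 * (v + 1) by ring, pvD_even, ih v (by omega)]

theorem pvD_odd_odd (t : Nat) (ht : t % 2 = 1) : pvD (2 * t + 1) = 2 * (pvD (t + 1) + 1) := by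
  obtain ⟨u, rfl⟩ : ∃ u, t = 2 * u + 1 := ⟨t / 2, by omega⟩
  rw [pvD_odd, show 3 * (2 * u + 1) + 1 = 2 * (3 * u + 2) by ring, pvXor_eo, pvP2,
      show 2 * u + 1 + 1 = 2 * (u + 1) by ring, pvD_even]

theorem pvTestBit_succ_even {y : Nat} (he : y % 2 = 0) (j : Nat) :
    (y + 1).testBit (j + 1) = y.testBit (j + 1) := by
  rw [Nat.testBit_add_one, Nat.testBit_add_one, show (y + 1) / 2 = y / 2 by omega]

-- where a nonzero digit sits, s-1 and s share that bit
theorem pvR (s : Nat) (hs : 0 < s) (j : Nat) (h : (pvD s).testBit j = true) :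
    (s - 1).testBit j = s.testBit j := by
  induction s using Nat.strong_induction_on generalizing j with
  | _ s ih =>
    rcases Nat.even_or_odd s with ⟨v, hv⟩ | ⟨v, hv⟩
    · have hv2 : s = 2 * v := by omega
      subst hv2
      have hvpos : 0 < v := by omega
      rcases j with _ | j
      · rw [pvD_even] at h
        rw [Nat.testBit_zero] at h
        simp at h
      · rw [pvD_even] at h
        rw [Nat.testBit_add_one, show 2 * (pvD v) / 2 = pvD v by omega] at h
        rw [Nat.testBit_add_one, Nat.testBit_add_one,
            show (2 * v - 1) / 2 = v - 1 by omega, show (2 * v) / 2 = v by omega]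
        exact ih v (by omega) hvpos j h
    · subst hv
      rcases j with _ | j
      · rw [pvD_odd] at h
        rw [Nat.testBit_zero] at h
        simp at h
      · rw [Nat.testBit_add_one, Nat.testBit_add_one,
            show (2 * v + 1 - 1) / 2 = v by omega, show (2 * v + 1) / 2 = v by omega]

theorem pvSize_double {y : Nat} (hy : 0 < y) : Nat.size (2 * y) = Nat.size y + 1 := by
  apply le_antisymm
  · rw [Nat.size_le]
    have := Nat.lt_size_self y
    calc 2 * y < 2 * 2 ^ Nat.size y := by omega
    _ = 2 ^ (Nat.size y + 1) := by ring
  · have h1 : 0 < Nat.size y := Nat.size_pos.mpr hy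
    have h2 : 2 ^ (Nat.size y - 1) ≤ y := by
      have := (@Nat.lt_size (Nat.size y - 1) y).mp (by omega)
      exact this
    have h3 : 2 ^ Nat.size y ≤ 2 * y := by
      calc 2 ^ Nat.size y = 2 * 2 ^ (Nat.size y - 1) := by
            rw [← pow_succ']
            congr 1
            omega
      _ ≤ 2 * y := by omega
    have := (@Nat.lt_size (Nat.size y) (2 * y)).mpr h3
    omega

theorem pvSize_succ_even {y : Nat} (hy : 0 < y) (he : y % 2 = 0) : Nat.size (y + 1) = Nat.size y := by
  apply le_antisymm
  · rw [Nat.size_le]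
    have h1 := Nat.lt_size_self y
    have h2 : 0 < Nat.size y := Nat.size_pos.mpr hy
    have h3 : 2 ^ Nat.size y % 2 = 0 := by
      have : (2:Nat) ∣ 2 ^ Nat.size y := dvd_pow_self 2 (by omega)
      omega
    omega
  · exact Nat.size_le_size (by omega)

theorem pvTestBit_double (x : Nat) (j : Nat) : (2 * x).testBit (j + 1) = x.testBit j := by
  rw [Nat.testBit_add_one, show 2 * x / 2 = x by omega]

theorem pvG_cons_of (n n' : Nat) (c : Int)
    (hsize : Nat.size (pvD n) - 1 = (Nat.size (pvD n') - 1) + 1)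
    (h0 : pvDig n 0 = c)
    (hstep : ∀ i, pvDig n (i + 1) = pvDig n' i) :
    pvG n = c :: pvG n' := by
  unfold pvG
  rw [hsize, List.range_succ_eq_map, List.map_cons, h0, List.map_map]
  have : pvDig n ∘ Nat.succ = pvDig n' := funext fun i => hstep i
  rw [this]

theorem pvDsize_ge (t : Nat) (ht : 0 < t) : 2 ≤ Nat.size (pvD t) := by
  have h1 := pvD_pos ht
  have h2 := pvD_mod2 t
  have h3 : 2 ^ 1 ≤ pvD t := by omega
  have := (@Nat.lt_size 1 (pvD t)).mpr h3
  omega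

theorem pvG_even (t : Nat) (ht : 0 < t) : pvG (2 * t) = 0 :: pvG t := by
  have hpos := pvD_pos ht
  have hmod := pvD_mod2 t
  have hge := pvDsize_ge t ht
  apply pvG_cons_of
  · rw [pvD_even, pvSize_double hpos]; omega
  · unfold pvDig
    rw [pvD_even, pvTestBit_double]
    rw [Nat.testBit_zero]
    simp [hmod]
  · intro i
    unfold pvDig
    rw [pvD_even, pvTestBit_double, show (i + 1 + 1) = (i + 1) + 1 by rfl,
        pvTestBit_double]

theorem pvG_odd1 (t : Nat) (ht : t % 2 = 0) : pvG (2 * t + 1) = 1 :: pvG t := by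
  rcases Nat.eq_zero_or_pos t with rfl | htp
  · decide
  · have hpos := pvD_pos htp
    have hmod := pvD_mod2 t
    have hge := pvDsize_ge t htp
    have hD : pvD (2 * t + 1) = 2 * (pvD t + 1) := pvD_odd_even t ht
    apply pvG_cons_of
    · rw [hD, pvSize_double (by omega), pvSize_succ_even hpos hmod]; omega
    · unfold pvDig
      rw [hD, pvTestBit_double]
      rw [if_pos (by rw [Nat.testBit_zero]; simp; omega)]
      rw [Nat.testBit_add_one, show (2 * t + 1) / 2 = t by omega, Nat.testBit_zero]
      simp [ht]
    · intro i
      unfold pvDig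
      rw [hD, pvTestBit_double, pvTestBit_succ_even hmod,
          Nat.testBit_add_one (2 * t + 1) (i + 1), show (2 * t + 1) / 2 = t by omega]

theorem pvG_odd3 (t : Nat) (ht : t % 2 = 1) : pvG (2 * t + 1) = -1 :: pvG (t + 1) := by
  have htp : 0 < t + 1 := by omega
  have hpos := pvD_pos htp
  have hmod := pvD_mod2 (t + 1)
  have hge := pvDsize_ge (t + 1) htp
  have hD : pvD (2 * t + 1) = 2 * (pvD (t + 1) + 1) := pvD_odd_odd t ht
  apply pvG_cons_of
  · rw [hD, pvSize_double (by omega), pvSize_succ_even hpos hmod]; omega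
  · unfold pvDig
    rw [hD, pvTestBit_double]
    rw [if_pos (by rw [Nat.testBit_zero]; simp; omega)]
    rw [Nat.testBit_add_one, show (2 * t + 1) / 2 = t by omega, Nat.testBit_zero]
    simp [ht]
  · intro i
    unfold pvDig
    rw [hD, pvTestBit_double, pvTestBit_succ_even hmod,
        Nat.testBit_add_one (2 * t + 1) (i + 1), show (2 * t + 1) / 2 = t by omega]
    by_cases hb : (pvD (t + 1)).testBit (i + 1)
    · rw [if_pos hb, if_pos hb]
      have := pvR (t + 1) htp (i + 1) hb
      rw [show t + 1 - 1 = t by omega] at this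
      rw [this]
    · rw [if_neg hb, if_neg hb]

theorem pvBooth_eq_G (m : Nat) : boothLoop (m : Int) = pvG m := by
  induction m using Nat.strong_induction_on with
  | _ m ih =>
    rcases Nat.eq_zero_or_pos m with rfl | hm
    · rw [boothLoop]
      simp [pvG, pvD]
    · rw [boothLoop, dif_pos (by exact_mod_cast hm)]
      have hl3 : Int.land (m : Int) 3 = ((m % 4 : Nat) : Int) := by
        rw [show (3:Int) = 2 ^ 2 - 1 by norm_num, pvLandMod _ 2 (by positivity)]
        push_cast
        omega
      have hl1 : Int.land (m : Int) 1 = ((m % 2 : Nat) : Int) := by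
        rw [show (1:Int) = 2 ^ 1 - 1 by norm_num, pvLandMod _ 1 (by positivity)]
        push_cast
        omega
      have hs : ((m : Int)) >>> (1:Nat) = ((m / 2 : Nat) : Int) := by
        rw [Int.shiftRight_eq_div_pow]
        push_cast
        omega
      have hs2 : ((m : Int) + 1) >>> (1:Nat) = (((m + 1) / 2 : Nat) : Int) := by
        rw [Int.shiftRight_eq_div_pow]
        push_cast
        omega
      have h4 : m % 4 = 0 ∨ m % 4 = 1 ∨ m % 4 = 2 ∨ m % 4 = 3 := by omega
      rcases h4 with h4 | h4 | h4 | h4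
      · rw [if_neg (by rw [hl3, h4]; norm_num)]
        rw [if_neg (by rw [hl3, h4]; norm_num)]
        rw [hs, ih (m / 2) (by omega)]
        obtain ⟨t, rfl⟩ : ∃ t, m = 2 * t := ⟨m / 2, by omega⟩
        rw [show 2 * t / 2 = t by omega, pvG_even t (by omega)]
      · rw [if_pos (by rw [hl3, h4]; left; norm_num)]
        rw [hl1, show m % 2 = 1 by omega, hs, ih (m / 2) (by omega)]
        obtain ⟨t, ht⟩ : ∃ t, m = 2 * t + 1 := ⟨m / 2, by omega⟩
        subst ht
        rw [show (2 * t + 1) / 2 = t by omega, pvG_odd1 t (by omega)]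
        norm_num
      · rw [if_pos (by rw [hl3, h4]; right; norm_num)]
        rw [hl1, show m % 2 = 0 by omega, hs, ih (m / 2) (by omega)]
        obtain ⟨t, ht⟩ : ∃ t, m = 2 * t := ⟨m / 2, by omega⟩
        subst ht
        rw [show 2 * t / 2 = t by omega, pvG_even t (by omega)]
        norm_num
      · rw [if_neg (by rw [hl3, h4]; norm_num)]
        rw [if_pos (by rw [hl3, h4]; norm_num)]
        rw [hs2, ih ((m + 1) / 2) (by omega)]
        obtain ⟨t, ht⟩ : ∃ t, m = 2 * t + 1 := ⟨m / 2, by omega⟩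
        subst ht
        rw [show (2 * t + 1 + 1) / 2 = t + 1 by omega, pvG_odd3 t (by omega)]

theorem pvAlt_eq (k : Int) (hk : 0 < k) : generate_booth_encoding_alt k = pvG (2 * k.toNat) := by
  unfold generate_booth_encoding_alt pvG pvDig pvD
  rw [if_neg (by omega)]

-- ===== VERDICT (by name: the statement is the Claim_ definition above) =====
theorem generate_booth_encoding_spec : Claim_equal_generate_booth_encoding := by
  intro k _
  unfold Spec_generate_booth_encoding generate_booth_encoding
  rw [show k <<< (1:Nat) = 2 * k by rw [Int.shiftLeft_eq]; ring]
  by_cases hk : 0 < k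
  · have h2 : (2 * k) = ((2 * k.toNat : Nat) : Int) := by omega
    rw [h2, pvBooth_eq_G, pvAlt_eq k hk]
  · rw [boothLoop, dif_neg (by omega)]
    unfold generate_booth_encoding_alt
    rw [if_pos (by omega)]
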